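-- pv_equiv track=rewrite | github.com/chughtapan/wags | src/wags/utils/quickstart.py | sanitize_method_name
-- ===== SOURCE A (Python) =====
-- def sanitize_method_name(name: str) -> str:
--     """Convert tool name to valid Python method name."""
--     # Replace common separators with underscore
--     for char in ["-", ".", "/", " "]:
--         name = name.replace(char, "_")
--
--     name = "".join(c if c.isalnum() or c == "_" else "" for c in name)
--
--     # Ensure it doesn't start with a number
--     if name and name[0].isdigit():
--         name = f"tool_{name}"
--
--     # Ensure it's not empty
--     if not name:
--         name = "tool"
--
--     return name.lower()
-- ===== SOURCE B (Python) =====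
-- def sanitize_method_name(name: str) -> str:
--     """Convert tool name to valid Python method name (single pass)."""
--     out = []
--     for c in name:
--         if c in "-./ ":
--             out.append("_")
--         elif c.isalnum() or c == "_":
--             out.append(c.lower())
--     if out and out[0].isdigit():
--         out.insert(0, "tool_")
--     if not out:
--         return "tool"
--     return "".join(out)
-- ===== Notes on version B (the rewrite author's own statement) =====
-- stated objective: simpler
-- what changed: Replaces A's four sequential replace scans plus a separate filter-join pass and a final lower() with one loop over the characters that maps separators to underscore, keeps alphanumerics/underscore already lowered, and drops the rest.
import Mathlib
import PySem

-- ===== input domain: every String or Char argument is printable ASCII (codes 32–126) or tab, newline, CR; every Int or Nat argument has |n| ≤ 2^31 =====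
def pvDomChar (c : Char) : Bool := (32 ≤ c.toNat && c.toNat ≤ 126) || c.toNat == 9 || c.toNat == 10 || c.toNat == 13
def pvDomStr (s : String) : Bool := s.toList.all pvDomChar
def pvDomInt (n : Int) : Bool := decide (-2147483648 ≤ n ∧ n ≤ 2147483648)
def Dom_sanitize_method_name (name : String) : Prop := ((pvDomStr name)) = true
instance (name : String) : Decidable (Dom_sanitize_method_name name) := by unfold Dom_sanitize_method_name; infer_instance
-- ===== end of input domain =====

-- B collapses A's four replace passes + filter-join + final lower() into one pass; objective: simpler.

-- ===== PORT A =====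
def sanitize_method_name (name : String) : String :=
  -- for char in ["-", ".", "/", " "]: name = name.replace(char, "_")
  let cs1 := PySem.Chars.replace name.toList ['-'] ['_']
  let cs2 := PySem.Chars.replace cs1 ['.'] ['_']
  let cs3 := PySem.Chars.replace cs2 ['/'] ['_']
  let cs4 := PySem.Chars.replace cs3 [' '] ['_']
  -- name = "".join(c if c.isalnum() or c == "_" else "" for c in name)
  let cs5 := PySem.Chars.join [] (cs4.map (fun c => if PySem.Chars.isalnum c || c == '_' then [c] else []))
  -- if name and name[0].isdigit(): name = f"tool_{name}"
  let cs6 := match cs5 with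
    | c :: _ => if PySem.Chars.isdigit c then "tool_".toList ++ cs5 else cs5
    | [] => cs5
  -- if not name: name = "tool"
  let cs7 := if cs6 = [] then "tool".toList else cs6
  -- return name.lower()
  String.mk (PySem.Chars.lower cs7)

-- ===== PORT B =====
-- one character of Source B's loop body: separators become '_', kept chars are lowered, the rest dropped
def pvKeep (c : Char) : List Char :=
  if c == '-' || c == '.' || c == '/' || c == ' ' then ['_']
  else if PySem.Chars.isalnum c || c == '_' then [PySem.Chars.lowerChar c]
  else []

def sanitize_method_name_alt (name : String) : String :=
  let out := name.toList.foldl (fun acc c => acc ++ pvKeep c) []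
  let out := match out with
    | c :: _ => if PySem.Chars.isdigit c then "tool_".toList ++ out else out
    | [] => out
  if out = [] then "tool" else String.mk out

-- ===== PRECONDITION & SPEC =====
def Spec_sanitize_method_name (name : String) (out : String) : Prop := out = sanitize_method_name_alt name
instance (name : String) (out : String) : Decidable (Spec_sanitize_method_name name out) := by unfold Spec_sanitize_method_name; infer_instance

-- ===== CLAIM (what is proved, stated in full; the proofs are below) =====
def Claim_equal_sanitize_method_name : Prop := ∀ (name : String), Dom_sanitize_method_name name → Spec_sanitize_method_name name (sanitize_method_name name)

-- ===== LEMMAS AND PROOFS =====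

-- single-char replace is a map
theorem pv_go_single (o n : Char) : ∀ (fuel : Nat) (l acc : List Char), l.length ≤ fuel →
    PySem.Chars.replace.go [o] [n] fuel l acc = acc.reverse ++ l.map (fun c => if c = o then n else c) := by
  intro fuel
  induction fuel with
  | zero =>
    intro l acc h
    have : l = [] := List.eq_nil_of_length_eq_zero (Nat.le_zero.mp h)
    subst this
    simp [PySem.Chars.replace.go]
  | succ k ih =>
    intro l acc h
    cases l with
    | nil => simp [PySem.Chars.replace.go]
    | cons c t =>
      by_cases hc : c = o
      · subst hc
        have hp : List.isPrefixOf [c] (c :: t) = true := by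
          simp [List.isPrefixOf]
        simp only [PySem.Chars.replace.go, hp, if_pos, List.length_cons, List.drop_succ_cons, List.length_nil, List.drop_zero, List.reverse_singleton, List.singleton_append]
        rw [ih t (n :: acc) (by simpa using Nat.lt_succ_iff.mp (by simpa using h))]
        simp
      · have hp : List.isPrefixOf [o] (c :: t) = false := by
          simp [List.isPrefixOf]
          intro h'; exact absurd h'.symm hc
        simp only [PySem.Chars.replace.go, hp]
        rw [ih t (c :: acc) (by simpa using Nat.lt_succ_iff.mp (by simpa using h))]
        simp [hc]

theorem pv_replace_single (s : List Char) (o n : Char) :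
    PySem.Chars.replace s [o] [n] = s.map (fun c => if c = o then n else c) := by
  simp [PySem.Chars.replace]
  rw [pv_go_single o n s.length s [] (le_refl _)]
  simp

theorem pv_join_nil (L : List (List Char)) : PySem.Chars.join [] L = L.flatten := by
  induction L with
  | nil => simp [PySem.Chars.join, List.intercalate]
  | cons x xs ih =>
    cases xs with
    | nil => simp [PySem.Chars.join, List.intercalate]
    | cons y ys =>
      simp [PySem.Chars.join, List.intercalate] at ih ⊢
      simpa using ih

theorem pv_foldl_append (f : Char → List Char) : ∀ (l : List Char) (acc : List Char),
    l.foldl (fun acc c => acc ++ f c) acc = acc ++ l.flatMap f := by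
  intro l
  induction l with
  | nil => simp
  | cons c t ih => intro acc; simp [List.foldl, ih]

-- A's composed four single-character substitutions
def pvSub4 (c : Char) : Char :=
  if (if (if (if c = '-' then '_' else c) = '.' then '_' else (if c = '-' then '_' else c)) = '/' then '_'
      else (if (if c = '-' then '_' else c) = '.' then '_' else (if c = '-' then '_' else c))) = ' ' then '_'
  else (if (if (if c = '-' then '_' else c) = '.' then '_' else (if c = '-' then '_' else c)) = '/' then '_'
      else (if (if c = '-' then '_' else c) = '.' then '_' else (if c = '-' then '_' else c)))

-- A's filter of one substituted character, lowered, is exactly B's per-character action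
theorem pv_pointwise (c : Char) :
    (if PySem.Chars.isalnum (pvSub4 c) || pvSub4 c == '_' then [pvSub4 c] else []).map PySem.Chars.lowerChar
      = pvKeep c := by
  by_cases h1 : c = '-'
  · subst h1; decide
  by_cases h2 : c = '.'
  · subst h2; decide
  by_cases h3 : c = '/'
  · subst h3; decide
  by_cases h4 : c = ' '
  · subst h4; decide
  · have hs : pvSub4 c = c := by simp [pvSub4, h1, h2, h3, h4]
    rw [hs]
    have hk : pvKeep c = if PySem.Chars.isalnum c || c == '_' then [PySem.Chars.lowerChar c] else [] := by
      simp [pvKeep, h1, h2, h3, h4]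
    rw [hk]
    by_cases ha : (PySem.Chars.isalnum c || c == '_') = true
    · simp [ha]
    · simp [ha]

theorem pv_isdigit_lower (c : Char) : PySem.Chars.isdigit (PySem.Chars.lowerChar c) = PySem.Chars.isdigit c := by
  unfold PySem.Chars.lowerChar
  split
  · rename_i h
    unfold PySem.Chars.isupper at h
    simp only [Bool.and_eq_true, decide_eq_true_eq, Char.le_def, UInt32.le_iff_toNat_le] at h
    obtain ⟨hA, hZ⟩ := h
    have hA' : 65 ≤ c.toNat := hA
    have hZ' : c.toNat ≤ 90 := hZ
    have hv : (c.toNat + 32).isValidChar := by left; omega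
    have ht : (Char.ofNat (c.toNat + 32)).toNat = c.toNat + 32 := by
      rw [Char.toNat_ofNat, if_pos hv]
    unfold PySem.Chars.isdigit
    simp only [Char.le_def, UInt32.le_iff_toNat_le]
    show (decide (('0' : Char).toNat ≤ (Char.ofNat (c.toNat + 32)).toNat)
        && decide ((Char.ofNat (c.toNat + 32)).toNat ≤ ('9' : Char).toNat))
      = (decide (('0' : Char).toNat ≤ c.toNat) && decide (c.toNat ≤ ('9' : Char).toNat))
    rw [ht]
    have r1 : decide ((c.toNat + 32) ≤ ('9' : Char).toNat) = false := decide_eq_false (by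
      show ¬ (c.toNat + 32 ≤ 57); omega)
    have r2 : decide (c.toNat ≤ ('9' : Char).toNat) = false := decide_eq_false (by
      show ¬ (c.toNat ≤ 57); omega)
    rw [r1, r2, Bool.and_false, Bool.and_false]
  · rfl

-- both ports as a function of the common filtered body
theorem pv_A_eq (name : String) :
    sanitize_method_name name =
      (let body := name.toList.flatMap
        (fun c => if PySem.Chars.isalnum (pvSub4 c) || pvSub4 c == '_' then [pvSub4 c] else [])
      let b2 := match body with
        | c :: _ => if PySem.Chars.isdigit c then "tool_".toList ++ body else body
        | [] => body
      String.mk (PySem.Chars.lower (if b2 = [] then "tool".toList else b2))) := by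
  simp only [sanitize_method_name, pv_replace_single, pv_join_nil]
  have hcomp : ∀ cs : List Char,
      (((cs.map (fun c => if c = '-' then '_' else c)).map (fun c => if c = '.' then '_' else c)).map
        (fun c => if c = '/' then '_' else c)).map (fun c => if c = ' ' then '_' else c)
      = cs.map pvSub4 := by
    intro cs
    simp only [List.map_map]
    rfl
  rw [hcomp, List.map_map]
  simp only [List.flatMap_def, Function.comp_def]

theorem pv_B_eq (name : String) :
    sanitize_method_name_alt name =
      (let out := name.toList.flatMap pvKeep
      let o2 := match out with
        | c :: _ => if PySem.Chars.isdigit c then "tool_".toList ++ out else out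
        | [] => out
      if o2 = [] then "tool" else String.mk o2) := by
  simp only [sanitize_method_name_alt, pv_foldl_append, List.nil_append]

-- ===== VERDICT (by name: the statement is the Claim_ definition above) =====
theorem sanitize_method_name_spec : Claim_equal_sanitize_method_name := by
  intro name _
  unfold Spec_sanitize_method_name
  rw [pv_A_eq, pv_B_eq]
  simp only []
  have hbody : name.toList.flatMap pvKeep =
      (name.toList.flatMap
        (fun c => if PySem.Chars.isalnum (pvSub4 c) || pvSub4 c == '_' then [pvSub4 c] else [])).map
        PySem.Chars.lowerChar := by
    rw [List.map_flatMap]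
    exact (List.flatMap_congr (fun c _ => (pv_pointwise c).symm))
  rw [hbody]
  cases hb : name.toList.flatMap
      (fun c => if PySem.Chars.isalnum (pvSub4 c) || pvSub4 c == '_' then [pvSub4 c] else []) with
  | nil => decide
  | cons c t =>
    simp only [List.map_cons]
    rw [pv_isdigit_lower]
    by_cases hd : PySem.Chars.isdigit c = true
    · simp only [hd, if_pos]
      have h1 : ("tool_".toList ++ c :: t) ≠ [] := by simp
      have h2 : ("tool_".toList ++ PySem.Chars.lowerChar c :: t.map PySem.Chars.lowerChar) ≠ [] := by simp
      rw [if_neg h1, if_neg h2]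
      simp [PySem.Chars.lower,
        show PySem.Chars.lowerChar 't' = 't' from by decide,
        show PySem.Chars.lowerChar 'o' = 'o' from by decide,
        show PySem.Chars.lowerChar 'l' = 'l' from by decide,
        show PySem.Chars.lowerChar '_' = '_' from by decide]
    · simp only [hd]
      simp [PySem.Chars.lower]
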